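-- pv_equiv track=rewrite | github.com/praveenimr/re--gio-nto-ccr-eatio-n | app.py | figures
-- ===== SOURCE A (Python) =====
-- def figures(keyword,segmentation,regions,companies):
--
--     segment = segmentation.split("#")
--     ch2 = "<strong>LIST OF FIGURES</strong>\n\n"
--     segment_heading = []
--
--     ch2 += ("FIGURE 001. YEARS CONSIDERED FOR ANALYSIS\nFIGURE 002. SCOPE OF THE STUDY\nFIGURE 003. XYZ MARKET OVERVIEW BY REGIONS\n"
--             +"FIGURE 004. PORTER'S FIVE FORCES ANALYSIS\nFIGURE 005. BARGAINING POWER OF SUPPLIERS\nFIGURE 006. COMPETITIVE RIVALRY"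
--             +"FIGURE 007. THREAT OF NEW ENTRANTS\nFIGURE 008. THREAT OF SUBSTITUTES\nFIGURE 009. VALUE CHAIN ANALYSIS\nFIGURE 010. PESTLE ANALYSIS")
--     count = 11
--     for s in segment:
--         x = s.split("::")
--         segment_heading.append(x[0])
--         ch2 += ("\nFIGURE "+str(count).zfill(3)+". XYZ MARKET OVERVIEW BY "+x[0].upper().strip())
--         y = x[1].split(",")
--         count = count + 1
--         for types in y:
--             ch2 += ("\nFIGURE "+str(count).zfill(3)+". "+str(types).upper().strip()+" MARKET OVERVIEW (2016-2030)")
--             count = count + 1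
--
--     t = regions.split(",")
--
--     for i in t:
--         ch2 += ("\nFIGURE "+str(count).zfill(3)+". "+str(i).upper().strip()+" XYZ MARKET OVERVIEW BY COUNTRY (2016-2030)")
--         count = count + 1
--
--
--     ch2 = ch2.replace("XYZ",keyword.strip().upper())
--
--     return ch2.replace("\n","<br />").replace("\t","&emsp;")
-- ===== SOURCE B (Python) =====
-- def _fig(n, d):
--     return "\nFIGURE " + str(n).zfill(3) + ". " + d
--
-- def figures(keyword, segmentation, regions, companies):
--     header = ("<strong>LIST OF FIGURES</strong>\n\n"
--               "FIGURE 001. YEARS CONSIDERED FOR ANALYSIS\nFIGURE 002. SCOPE OF THE STUDY\nFIGURE 003. XYZ MARKET OVERVIEW BY REGIONS\n"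
--               "FIGURE 004. PORTER'S FIVE FORCES ANALYSIS\nFIGURE 005. BARGAINING POWER OF SUPPLIERS\nFIGURE 006. COMPETITIVE RIVALRY"
--               "FIGURE 007. THREAT OF NEW ENTRANTS\nFIGURE 008. THREAT OF SUBSTITUTES\nFIGURE 009. VALUE CHAIN ANALYSIS\nFIGURE 010. PESTLE ANALYSIS")
--     # stage 1: independent description blocks (one per segment, plus the regions block)
--     blocks = []
--     for s in segmentation.split("#"):
--         x = s.split("::")
--         blocks.append(["XYZ MARKET OVERVIEW BY " + x[0].upper().strip()]
--                       + [t.upper().strip() + " MARKET OVERVIEW (2016-2030)" for t in x[1].split(",")])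
--     blocks.append([r.upper().strip() + " XYZ MARKET OVERVIEW BY COUNTRY (2016-2030)" for r in regions.split(",")])
--     # stage 2: prefix-sum of block sizes gives each block's starting figure number
--     starts = [11]
--     for b in blocks:
--         starts.append(starts[-1] + len(b))
--     # stage 3: render each block with numbers computed arithmetically as start + offset
--     body = "".join(
--         "".join(_fig(start + j, d) for j, d in enumerate(block))
--         for start, block in zip(starts, blocks))
--     out = (header + body).replace("XYZ", keyword.strip().upper())
--     return out.replace("\n", "<br />").replace("\t", "&emsp;")
-- ===== Notes on version B (the rewrite author's own statement) =====
-- stated objective: alternative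
-- what changed: A threads one mutable counter and a growing string through three interleaved loops; B stages the work: it builds independent per-segment description blocks, computes each block's starting figure number by a prefix-sum over block sizes, and renders every line's number arithmetically as start+offset before one join and the final replacements.
import Mathlib
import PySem

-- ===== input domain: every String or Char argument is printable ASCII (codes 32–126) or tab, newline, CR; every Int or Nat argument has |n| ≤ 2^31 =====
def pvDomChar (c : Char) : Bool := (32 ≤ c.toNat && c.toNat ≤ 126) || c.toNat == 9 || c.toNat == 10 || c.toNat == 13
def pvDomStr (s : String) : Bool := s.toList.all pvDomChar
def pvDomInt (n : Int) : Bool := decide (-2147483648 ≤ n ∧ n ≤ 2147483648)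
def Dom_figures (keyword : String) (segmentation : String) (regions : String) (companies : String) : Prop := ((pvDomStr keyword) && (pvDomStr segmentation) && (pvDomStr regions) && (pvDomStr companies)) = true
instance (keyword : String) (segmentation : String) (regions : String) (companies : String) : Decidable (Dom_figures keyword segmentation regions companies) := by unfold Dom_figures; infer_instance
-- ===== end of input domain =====

-- B replaces A's running counter threaded through three interleaved loops by a staged computation:
-- independent description blocks, a prefix-sum of block sizes for the starting numbers, and
-- arithmetic start+offset numbering. Return values agree on Pre_.

-- ===== PORT A =====
def figures (keyword : String) (segmentation : String) (regions : String) (companies : String) : String :=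
  let segment := PySem.Chars.splitOn segmentation.toList "#".toList
  let ch2 := "<strong>LIST OF FIGURES</strong>\n\n".toList
  let ch2 := ch2 ++ ("FIGURE 001. YEARS CONSIDERED FOR ANALYSIS\nFIGURE 002. SCOPE OF THE STUDY\nFIGURE 003. XYZ MARKET OVERVIEW BY REGIONS\n".toList
      ++ "FIGURE 004. PORTER'S FIVE FORCES ANALYSIS\nFIGURE 005. BARGAINING POWER OF SUPPLIERS\nFIGURE 006. COMPETITIVE RIVALRY".toList
      ++ "FIGURE 007. THREAT OF NEW ENTRANTS\nFIGURE 008. THREAT OF SUBSTITUTES\nFIGURE 009. VALUE CHAIN ANALYSIS\nFIGURE 010. PESTLE ANALYSIS".toList)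
  let st := segment.foldl (fun (p : List Char × Int) s =>
      let x := PySem.Chars.splitOn s "::".toList
      let ch2 := p.1 ++ "\nFIGURE ".toList ++ PySem.Chars.zfill (PySem.Int.toChars p.2) 3
                   ++ ". XYZ MARKET OVERVIEW BY ".toList ++ PySem.Chars.strip (PySem.Chars.upper (x.headD []))
      let y := PySem.Chars.splitOn (x[1]?.getD []) ",".toList   -- x[1]: Pre_ guarantees the index exists (Python raises otherwise)
      let count := p.2 + 1
      y.foldl (fun (q : List Char × Int) types =>
          (q.1 ++ "\nFIGURE ".toList ++ PySem.Chars.zfill (PySem.Int.toChars q.2) 3 ++ ". ".toList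
             ++ PySem.Chars.strip (PySem.Chars.upper types) ++ " MARKET OVERVIEW (2016-2030)".toList, q.2 + 1))
        (ch2, count))
    (ch2, (11 : Int))
  let t := PySem.Chars.splitOn regions.toList ",".toList
  let st := t.foldl (fun (q : List Char × Int) i =>
      (q.1 ++ "\nFIGURE ".toList ++ PySem.Chars.zfill (PySem.Int.toChars q.2) 3 ++ ". ".toList
         ++ PySem.Chars.strip (PySem.Chars.upper i) ++ " XYZ MARKET OVERVIEW BY COUNTRY (2016-2030)".toList, q.2 + 1)) st
  let ch2 := PySem.Chars.replace st.1 "XYZ".toList (PySem.Chars.upper (PySem.Chars.strip keyword.toList))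
  String.ofList (PySem.Chars.replace (PySem.Chars.replace ch2 "\n".toList "<br />".toList) "\t".toList "&emsp;".toList)

-- ===== PORT B =====
-- helper _fig of Source B
def pvFig (n : Int) (d : List Char) : List Char :=
  "\nFIGURE ".toList ++ PySem.Chars.zfill (PySem.Int.toChars n) 3 ++ ". ".toList ++ d

-- body of Source B's per-segment block loop
def pvSegBlock (s : List Char) : List (List Char) :=
  let x := PySem.Chars.splitOn s "::".toList
  ("XYZ MARKET OVERVIEW BY ".toList ++ PySem.Chars.strip (PySem.Chars.upper (x.headD []))) ::
    (PySem.Chars.splitOn (x[1]?.getD []) ",".toList).map   -- x[1]: Pre_ guarantees the index exists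
      (fun t => PySem.Chars.strip (PySem.Chars.upper t) ++ " MARKET OVERVIEW (2016-2030)".toList)

-- body of Source B's regions comprehension
def pvRegDesc (r : List Char) : List Char :=
  PySem.Chars.strip (PySem.Chars.upper r) ++ " XYZ MARKET OVERVIEW BY COUNTRY (2016-2030)".toList

def figures_alt (keyword : String) (segmentation : String) (regions : String) (companies : String) : String :=
  let header := "<strong>LIST OF FIGURES</strong>\n\n".toList
      ++ ("FIGURE 001. YEARS CONSIDERED FOR ANALYSIS\nFIGURE 002. SCOPE OF THE STUDY\nFIGURE 003. XYZ MARKET OVERVIEW BY REGIONS\n".toList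
      ++ "FIGURE 004. PORTER'S FIVE FORCES ANALYSIS\nFIGURE 005. BARGAINING POWER OF SUPPLIERS\nFIGURE 006. COMPETITIVE RIVALRY".toList
      ++ "FIGURE 007. THREAT OF NEW ENTRANTS\nFIGURE 008. THREAT OF SUBSTITUTES\nFIGURE 009. VALUE CHAIN ANALYSIS\nFIGURE 010. PESTLE ANALYSIS".toList)
  -- stage 1: independent description blocks
  let blocks : List (List (List Char)) :=
    (PySem.Chars.splitOn segmentation.toList "#".toList).map pvSegBlock
    ++ [(PySem.Chars.splitOn regions.toList ",".toList).map pvRegDesc]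
  -- stage 2: prefix-sum of block sizes (starts[-1] via pyGet? -1; the list is never empty)
  let starts : List Int := blocks.foldl
      (fun (l : List Int) b => l ++ [(PySem.List.pyGet? l (-1)).getD 0 + (b.length : Int)]) [11]
  -- stage 3: render each block with numbers start + offset
  let body := PySem.Chars.join [] ((starts.zip blocks).map (fun p =>
      PySem.Chars.join [] ((PySem.List.enumerate p.2 0).map (fun q => pvFig (p.1 + q.1) q.2))))
  let out := PySem.Chars.replace (header ++ body) "XYZ".toList (PySem.Chars.upper (PySem.Chars.strip keyword.toList))
  String.ofList (PySem.Chars.replace (PySem.Chars.replace out "\n".toList "<br />".toList) "\t".toList "&emsp;".toList)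

-- ===== PRECONDITION & SPEC =====
-- Pre_ excludes exactly the inputs where some '#'-segment of segmentation contains no "::": there
-- Python A raises IndexError on x[1] (and B raises the same way), so no value is claimed.
def Pre_figures (keyword : String) (segmentation : String) (regions : String) (companies : String) : Prop :=
  ∀ s ∈ PySem.Chars.splitOn segmentation.toList "#".toList, 2 ≤ (PySem.Chars.splitOn s "::".toList).length
instance (keyword : String) (segmentation : String) (regions : String) (companies : String) : Decidable (Pre_figures keyword segmentation regions companies) := by unfold Pre_figures; infer_instance
def pvWitness_figures : String × String × String × String := ("gadget", "Type::Small,Large#End Use::Retail", "Asia,Europe", "X Corp")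

def Spec_figures (keyword : String) (segmentation : String) (regions : String) (companies : String) (out : String) : Prop := out = figures_alt keyword segmentation regions companies
instance (keyword : String) (segmentation : String) (regions : String) (companies : String) (out : String) : Decidable (Spec_figures keyword segmentation regions companies out) := by unfold Spec_figures; infer_instance

-- ===== CLAIM (what is proved, stated in full; the proofs are below) =====
def Claim_equal_figures : Prop := ∀ (keyword : String) (segmentation : String) (regions : String) (companies : String), Dom_figures keyword segmentation regions companies → Pre_figures keyword segmentation regions companies → Spec_figures keyword segmentation regions companies (figures keyword segmentation regions companies)

-- ===== LEMMAS AND PROOFS =====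
def pvStep (p : List Char × Int) (d : List Char) : List Char × Int := (p.1 ++ pvFig p.2 d, p.2 + 1)

lemma pv_join_nil_eq_flatten (l : List (List Char)) : PySem.Chars.join [] l = l.flatten := by
  induction l with
  | nil => simp [PySem.Chars.join_nil]
  | cons a t ih =>
    cases t with
    | nil => simp [PySem.Chars.join_singleton]
    | cons b u => rw [PySem.Chars.join_cons_cons] at *; simp_all

lemma pv_foldl_step (ds : List (List Char)) (acc : List Char) (n : Int) :
    ds.foldl pvStep (acc, n)
      = (acc ++ ((PySem.List.enumerate ds n).map (fun p => pvFig p.1 p.2)).flatten, n + ds.length) := by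
  induction ds generalizing acc n with
  | nil => simp
  | cons d t ih =>
    rw [List.foldl_cons]
    show List.foldl pvStep (acc ++ pvFig n d, n + 1) t = _
    rw [ih, PySem.List.enumerate_cons]
    simp [List.append_assoc]
    omega

lemma pv_lit1 : (". XYZ MARKET OVERVIEW BY ").toList = ". ".toList ++ "XYZ MARKET OVERVIEW BY ".toList := by decide

lemma pvA_regions (rs : List (List Char)) (p : List Char × Int) :
    List.foldl (fun (q : List Char × Int) i =>
        (q.1 ++ "\nFIGURE ".toList ++ PySem.Chars.zfill (PySem.Int.toChars q.2) 3 ++ ". ".toList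
           ++ PySem.Chars.strip (PySem.Chars.upper i) ++ " XYZ MARKET OVERVIEW BY COUNTRY (2016-2030)".toList, q.2 + 1)) p rs
    = List.foldl pvStep p (rs.map pvRegDesc) := by
  rw [List.foldl_map]
  congr 1
  funext q i
  simp [pvStep, pvFig, pvRegDesc, List.append_assoc]

lemma pvA_outer (segs : List (List Char)) (p : List Char × Int) :
    List.foldl (fun (p : List Char × Int) s =>
      List.foldl (fun (q : List Char × Int) types =>
          (q.1 ++ "\nFIGURE ".toList ++ PySem.Chars.zfill (PySem.Int.toChars q.2) 3 ++ ". ".toList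
             ++ PySem.Chars.strip (PySem.Chars.upper types) ++ " MARKET OVERVIEW (2016-2030)".toList, q.2 + 1))
        (p.1 ++ "\nFIGURE ".toList ++ PySem.Chars.zfill (PySem.Int.toChars p.2) 3
           ++ ". XYZ MARKET OVERVIEW BY ".toList ++ PySem.Chars.strip (PySem.Chars.upper ((PySem.Chars.splitOn s "::".toList).headD [])), p.2 + 1)
        (PySem.Chars.splitOn ((PySem.Chars.splitOn s "::".toList)[1]?.getD []) ",".toList))
      p segs
    = List.foldl pvStep p (segs.flatMap pvSegBlock) := by
  induction segs generalizing p with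
  | nil => rfl
  | cons s t ih =>
    rw [List.foldl_cons, ih, List.flatMap_cons, List.foldl_append]
    congr 1
    simp only [pvSegBlock, List.foldl_cons, List.foldl_map]
    congr 1
    · funext q types
      simp [pvStep, pvFig, List.append_assoc]
    · simp [pvStep, pvFig, pv_lit1, List.append_assoc]

-- B-side: the prefix-sum list of starts, in recursive (scanl) form
def pvStarts (n : Int) : List (List (List Char)) → List Int
  | [] => [n]
  | b :: t => n :: pvStarts (n + b.length) t

lemma pv_foldl_starts (bs : List (List (List Char))) (l : List Int) (n : Int) :
    bs.foldl (fun (l : List Int) b => l ++ [(PySem.List.pyGet? l (-1)).getD 0 + (b.length : Int)]) (l ++ [n])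
      = l ++ pvStarts n bs := by
  induction bs generalizing l n with
  | nil => simp [pvStarts]
  | cons b t ih =>
    rw [List.foldl_cons]
    have hlast : PySem.List.pyGet? (l ++ [n]) (-1) = some n := by
      simp [PySem.List.pyGet?, PySem.List.pyIdx?]
    rw [hlast]
    simpa [pvStarts, List.append_assoc] using ih (l ++ [n]) (n + b.length)

lemma pv_enum_shift (b : List (List Char)) (k m : Int) :
    (PySem.List.enumerate b k).map (fun q => pvFig (m + q.1) q.2)
      = (PySem.List.enumerate b (m + k)).map (fun q => pvFig q.1 q.2) := by
  induction b generalizing k with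
  | nil => simp [PySem.List.enumerate_nil]
  | cons d t ih =>
    rw [PySem.List.enumerate_cons, PySem.List.enumerate_cons, List.map_cons, List.map_cons, ih (k + 1)]
    ring_nf

lemma pv_blocks_render (bs : List (List (List Char))) (n : Int) :
    (((pvStarts n bs).zip bs).map (fun p =>
        PySem.Chars.join [] ((PySem.List.enumerate p.2 0).map (fun q => pvFig (p.1 + q.1) q.2)))).flatten
      = ((PySem.List.enumerate bs.flatten n).map (fun p => pvFig p.1 p.2)).flatten := by
  induction bs generalizing n with
  | nil => simp [pvStarts, PySem.List.enumerate_nil]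
  | cons b t ih =>
    rw [pvStarts, List.flatten_cons, PySem.List.enumerate_append, List.map_append, List.flatten_append, ← ih (n + b.length)]
    show (PySem.Chars.join [] _) ++ _ = _
    rw [pv_join_nil_eq_flatten, pv_enum_shift]
    simp [List.zip, List.map_zipWith]

lemma pv_flatten_snoc (f : List Char → List (List Char)) (l : List (List Char)) (m : List (List Char)) :
    (l.map f ++ [m]).flatten = l.flatMap f ++ m := by
  simp [List.flatMap_def]

-- ===== VERDICT (by name: the statement is the Claim_ definition above) =====
theorem figures_spec : Claim_equal_figures := by
  intro keyword segmentation regions companies _ _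
  unfold Spec_figures
  simp only [figures, figures_alt]
  rw [pvA_regions, pvA_outer, ← List.foldl_append, pv_foldl_step]
  rw [show ([(11 : Int)] = [] ++ [(11 : Int)]) from rfl, pv_foldl_starts, List.nil_append,
      pv_join_nil_eq_flatten, pv_blocks_render, pv_flatten_snoc]
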